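-- pv_equiv track=rewrite | github.com/mbassam99/HTTP-and-Docker | helper.py | find_int
-- ===== SOURCE A (Python) =====
-- def find_int(findInt):
--
--     string_id = ""
--     int_id = -1
--
--     for string in findInt:
--         for eachChar in string:
--             if eachChar.isdigit():
--                 string_id += eachChar
--
--     if string_id == "":
--         pass
--     else:
--         int_id = int_id + int(string_id) + 1
--     return int_id
-- ===== SOURCE B (Python) =====
-- def find_int(findInt):
--     # Build the result back-to-front: scan strings and characters in REVERSE order,
--     # adding each digit times its current place value (1, 10, 100, ...), so the
--     # answer is assembled by positional summation instead of string parsing.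
--     total = 0
--     place = 1
--     found = False
--     for string in reversed(findInt):
--         for ch in reversed(string):
--             if ch.isdigit():
--                 total += (ord(ch) - 48) * place
--                 place *= 10
--                 found = True
--     return total if found else -1
-- ===== Notes on version B (the rewrite author's own statement) =====
-- stated objective: alternative
-- what changed: B traverses the strings and characters back-to-front and assembles the answer by positional summation (digit * place, place *= 10) with a found flag, instead of A's forward scan that concatenates a digit string and parses it once with int().
import Mathlib
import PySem

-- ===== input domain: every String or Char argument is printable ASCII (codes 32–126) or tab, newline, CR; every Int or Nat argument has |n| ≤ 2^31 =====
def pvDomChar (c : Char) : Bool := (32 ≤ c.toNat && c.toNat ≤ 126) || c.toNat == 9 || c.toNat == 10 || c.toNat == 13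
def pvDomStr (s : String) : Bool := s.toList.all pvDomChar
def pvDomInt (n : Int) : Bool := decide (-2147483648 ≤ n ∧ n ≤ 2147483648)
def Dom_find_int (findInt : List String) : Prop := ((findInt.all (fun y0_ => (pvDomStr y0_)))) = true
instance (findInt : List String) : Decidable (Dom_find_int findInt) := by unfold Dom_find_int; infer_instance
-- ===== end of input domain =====

-- B builds the result back-to-front: it scans strings and characters in reverse, summing
-- digit * place with place *= 10, instead of A's forward digit-string concatenation + int(); same cost.


-- ===== PORT A =====
-- string_id is kept as a List Char (PySem string convention); '+= eachChar' is append.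
-- int(string_id) is PySem.Int.ofChars?; it is only called when string_id is a nonempty list of
-- ASCII digits, where int() never raises, so '.getD 0' is exact (the default is never taken).
def find_int (findInt : List String) : Int :=
  let string_id : List Char :=
    findInt.foldl (fun sid s =>
      s.toList.foldl (fun sid c => if PySem.Chars.isdigit c then sid ++ [c] else sid) sid) []
  let int_id : Int := -1
  if string_id = [] then int_id
  else int_id + (PySem.Int.ofChars? string_id).getD 0 + 1

-- ===== PORT B =====
-- reversed(...) is List.reverse; 'ord(ch)' is Char.toNat (cast to Int);
-- the loop state is the triple (total, place, found).
def find_int_alt (findInt : List String) : Int :=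
  let st : Int × Int × Bool :=
    findInt.reverse.foldl (fun st s =>
      s.toList.reverse.foldl (fun st c =>
        if PySem.Chars.isdigit c then
          (st.1 + ((c.toNat : Int) - 48) * st.2.1, st.2.1 * 10, true)
        else st) st)
      ((0 : Int), (1 : Int), false)
  if st.2.2 then st.1 else -1

-- ===== PRECONDITION & SPEC =====
def Spec_find_int (findInt : List String) (out : Int) : Prop := out = find_int_alt findInt
instance (findInt : List String) (out : Int) : Decidable (Spec_find_int findInt out) := by unfold Spec_find_int; infer_instance

-- ===== CLAIM (what is proved, stated in full; the proofs are below) =====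
def Claim_equal_find_int : Prop := ∀ (findInt : List String), Dom_find_int findInt → Spec_find_int findInt (find_int findInt)

-- ===== LEMMAS AND PROOFS =====

-- the digit characters of the whole input, in order
def pvDigits (findInt : List String) : List Char :=
  findInt.flatMap (fun s => s.toList.filter PySem.Chars.isdigit)

-- A's accumulated string is exactly pvDigits
theorem pvA_state (findInt : List String) (init : List Char) :
    findInt.foldl (fun sid s =>
      s.toList.foldl (fun sid c => if PySem.Chars.isdigit c then sid ++ [c] else sid) sid) init
    = init ++ pvDigits findInt := by
  induction findInt generalizing init with
  | nil => simp [pvDigits]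
  | cons s rest ih =>
    simp only [List.foldl_cons, pvDigits, List.flatMap_cons, ih]
    rw [PySem.List.foldl_append_if]
    simp [List.append_assoc]

-- forward positional value of a digit list
def pvVal (a : Int) (cs : List Char) : Int :=
  cs.foldl (fun a c => a * 10 + ((c.toNat : Int) - 48)) a

-- B's raw step on one (already known to be digit) character
def pvBStep (st : Int × Int × Bool) (c : Char) : Int × Int × Bool :=
  (st.1 + ((c.toNat : Int) - 48) * st.2.1, st.2.1 * 10, true)

-- a fold guarded by 'if p c' is the unguarded fold over the filtered list
theorem pvFold_filter {σ : Type} (g : σ → Char → σ) (p : Char → Bool)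
    (l : List Char) (st : σ) :
    l.foldl (fun st c => if p c then g st c else st) st
      = (l.filter p).foldl g st := by
  induction l generalizing st with
  | nil => rfl
  | cons c rest ih =>
    by_cases h : p c = true <;> simp [h, ih]

-- a nested fold over strings is a fold over the flatMap of their (filtered) characters
theorem pvFold_flat {σ : Type} (g : σ → Char → σ) (f : String → List Char)
    (l : List String) (st : σ) :
    l.foldl (fun st s => (f s).foldl g st) st = (l.flatMap f).foldl g st := by
  induction l generalizing st with
  | nil => rfl
  | cons s rest ih => simp [ih, List.foldl_append]

-- shifting the accumulator of pvVal
theorem pvVal_shift (a : Int) (cs : List Char) :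
    pvVal a cs = a * 10 ^ cs.length + pvVal 0 cs := by
  induction cs generalizing a with
  | nil => simp [pvVal]
  | cons c rest ih =>
    simp only [pvVal, List.foldl_cons, List.length_cons] at *
    rw [ih (a * 10 + ((c.toNat : Int) - 48)), ih (0 * 10 + ((c.toNat : Int) - 48))]
    ring

-- B's fold over the REVERSED digit list computes the forward positional value
theorem pvB_rev (ds : List Char) (t p : Int) (f : Bool) :
    ds.reverse.foldl pvBStep (t, p, f)
      = (t + p * pvVal 0 ds, p * 10 ^ ds.length, f || !ds.isEmpty) := by
  induction ds generalizing t p f with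
  | nil => simp [pvVal]
  | cons d rest ih =>
    rw [List.reverse_cons, List.foldl_append, ih]
    simp only [List.foldl_cons, List.foldl_nil, pvBStep, List.length_cons, List.isEmpty_cons]
    refine Prod.ext ?_ (Prod.ext ?_ ?_)
    · show t + p * pvVal 0 rest + ((d.toNat : Int) - 48) * (p * 10 ^ rest.length)
        = t + p * pvVal 0 (d :: rest)
      have : pvVal 0 (d :: rest) = pvVal (0 * 10 + ((d.toNat : Int) - 48)) rest := by
        simp [pvVal]
      have hs := pvVal_shift (0 * 10 + ((d.toNat : Int) - 48)) rest
      rw [this, hs]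
      ring
    · show p * 10 ^ rest.length * 10 = p * 10 ^ (rest.length + 1)
      ring
    · simp

theorem pvDigit_bounds {c : Char} (h : PySem.Chars.isdigit c = true) :
    48 ≤ c.toNat ∧ c.toNat ≤ 57 := by
  simp only [PySem.Chars.isdigit, Bool.and_eq_true, decide_eq_true_eq, Char.le_def] at h
  exact h

theorem pv_isDigit {c : Char} (h : PySem.Chars.isdigit c = true) : c.isDigit = true := by
  have hb := pvDigit_bounds h
  simp only [Char.isDigit, Bool.and_eq_true, decide_eq_true_eq]
  exact hb

theorem pv_isIntSpace_false {c : Char} (h : PySem.Chars.isdigit c = true) :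
    PySem.Int.isIntSpace c = false := by
  have hb := pvDigit_bounds h
  simp only [PySem.Int.isIntSpace, Bool.or_eq_false_iff, decide_eq_false_iff_not]
  refine ⟨⟨⟨⟨⟨?_, ?_⟩, ?_⟩, ?_⟩, ?_⟩, ?_⟩ <;> (rintro rfl; revert hb; decide)

theorem pv_dropWhile_digits (l : List Char)
    (hd : ∀ c ∈ l, PySem.Chars.isdigit c = true) :
    List.dropWhile PySem.Int.isIntSpace l = l := by
  cases l with
  | nil => rfl
  | cons c rest => simp [pv_isIntSpace_false (hd c (by simp))]

-- value of an all-digit character run, mirroring how int() accumulates it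
def pvNVal (a : Nat) (cs : List Char) : Nat :=
  cs.foldl (fun a c => a * 10 + (c.toNat - '0'.toNat)) a

theorem pvNVal_cast (a : Nat) (cs : List Char)
    (hd : ∀ c ∈ cs, PySem.Chars.isdigit c = true) :
    ((pvNVal a cs : Nat) : Int) = pvVal (a : Int) cs := by
  induction cs generalizing a with
  | nil => simp [pvNVal, pvVal]
  | cons c rest ih =>
    have hb := pvDigit_bounds (hd c (by simp))
    have h := ih (a * 10 + (c.toNat - '0'.toNat)) (fun x hx => hd x (by simp [hx]))
    simp only [pvNVal, pvVal, List.foldl_cons] at *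
    rw [h]
    have h0 : '0'.toNat = 48 := rfl
    rw [h0]
    congr 1
    push_cast [Nat.cast_sub hb.1]
    ring

-- pulls int()'s digit-run parser out of the map/bind wrapper without naming it
theorem pv_wrap (X : Option Nat) (v : Nat) (h : X = some v) :
    Option.map (fun n : Int => n) (do let a ← X; pure ((a : Nat) : Int))
      = some ((v : Nat) : Int) := by
  subst h; rfl

-- int() on a nonempty all-digit character list
theorem pv_ofChars_digits (cs : List Char) (hne : cs ≠ [])
    (hd : ∀ c ∈ cs, PySem.Chars.isdigit c = true) :
    PySem.Int.ofChars? cs = some ((pvNVal 0 cs : Nat) : Int) := by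
  obtain ⟨c, rest, rfl⟩ := List.exists_cons_of_ne_nil hne
  have hrev : ∀ x ∈ (c :: rest).reverse, PySem.Chars.isdigit x = true := by
    intro x hx
    exact hd x (List.mem_reverse.mp hx)
  rw [PySem.Int.ofChars?.eq_def]
  simp only [pv_dropWhile_digits _ hd, pv_dropWhile_digits _ hrev, List.reverse_reverse]
  split
  · rename_i ds heq
    exfalso
    have : PySem.Chars.isdigit '-' = true := by
      have := hd c (by simp)
      rw [List.cons.injEq] at heq
      exact heq.1 ▸ this
    exact absurd this (by decide)
  · rename_i ds heq
    exfalso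
    have : PySem.Chars.isdigit '+' = true := by
      have := hd c (by simp)
      rw [List.cons.injEq] at heq
      exact heq.1 ▸ this
    exact absurd this (by decide)
  · rename_i hm hp
    refine pv_wrap _ _ ?_
    -- goal: the (private) digit-run parser applied to c :: rest returns pvNVal 0 (c :: rest);
    -- conv/whnf steps it one character at a time, so its name is never written out
    have hc := pv_isDigit (hd c (by simp))
    conv_lhs => whnf
    rw [hc]
    conv_lhs => whnf
    rw [show pvNVal 0 (c :: rest)
        = pvNVal (0 * 10 + (c.toNat - '0'.toNat)) rest from by simp [pvNVal]]
    have hd' : ∀ x ∈ rest, PySem.Chars.isdigit x = true := fun x hx => hd x (by simp [hx])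
    clear hc hd hrev hne hm hp
    generalize (0 * 10 + (c.toNat - '0'.toNat) : Nat) = acc
    revert hd'
    induction rest generalizing acc with
    | nil =>
      intro _
      conv_lhs => whnf
      simp [pvNVal]
    | cons d tail ih =>
      intro hd'
      have hdd := pv_isDigit (hd' d (by simp))
      conv_lhs => whnf
      rw [hdd]
      conv_lhs => whnf
      rw [show pvNVal acc (d :: tail)
          = pvNVal (acc * 10 + (d.toNat - '0'.toNat)) tail from by simp [pvNVal]]
      exact ih _ (fun x hx => hd' x (by simp [hx]))

theorem pvDigits_all (findInt : List String) :
    ∀ c ∈ pvDigits findInt, PySem.Chars.isdigit c = true := by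
  intro c hc
  simp only [pvDigits, List.mem_flatMap, List.mem_filter] at hc
  obtain ⟨s, _, _, h⟩ := hc
  exact h

-- B's whole nested loop, reduced to the forward digit list
theorem pvB_state (findInt : List String) :
    findInt.reverse.foldl (fun st s =>
      s.toList.reverse.foldl (fun st c =>
        if PySem.Chars.isdigit c then
          (st.1 + ((c.toNat : Int) - 48) * st.2.1, st.2.1 * 10, true)
        else st) st)
      ((0 : Int), (1 : Int), false)
    = (pvVal 0 (pvDigits findInt), 10 ^ (pvDigits findInt).length,
       !(pvDigits findInt).isEmpty) := by
  have h1 : ∀ (s : String) (st : Int × Int × Bool),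
      s.toList.reverse.foldl (fun st c =>
        if PySem.Chars.isdigit c then
          (st.1 + ((c.toNat : Int) - 48) * st.2.1, st.2.1 * 10, true)
        else st) st
      = (s.toList.reverse.filter PySem.Chars.isdigit).foldl pvBStep st := by
    intro s st
    exact pvFold_filter pvBStep PySem.Chars.isdigit _ st
  calc findInt.reverse.foldl (fun st s =>
        s.toList.reverse.foldl (fun st c =>
          if PySem.Chars.isdigit c then
            (st.1 + ((c.toNat : Int) - 48) * st.2.1, st.2.1 * 10, true)
          else st) st) ((0 : Int), (1 : Int), false)
      = (findInt.reverse.flatMap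
          (fun s => s.toList.reverse.filter PySem.Chars.isdigit)).foldl pvBStep
          ((0 : Int), (1 : Int), false) := by
        rw [← pvFold_flat pvBStep (fun s => s.toList.reverse.filter PySem.Chars.isdigit)]
        apply PySem.List.foldl_congr_mem
        intro st s _
        exact h1 s st
    _ = (pvDigits findInt).reverse.foldl pvBStep ((0 : Int), (1 : Int), false) := by
        congr 1
        simp [pvDigits, List.reverse_flatMap, List.filter_reverse, Function.comp_def]
    _ = _ := by rw [pvB_rev]; simp

-- ===== VERDICT (by name: the statement is the Claim_ definition above) =====
theorem find_int_spec : Claim_equal_find_int := by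
  intro findInt _
  unfold Spec_find_int find_int find_int_alt
  rw [pvA_state, pvB_state]
  simp only [List.nil_append]
  by_cases h : pvDigits findInt = []
  · simp [h]
  · have hall := pvDigits_all findInt
    rw [if_neg h, pv_ofChars_digits _ h hall, Option.getD_some]
    have hcast := pvNVal_cast 0 (pvDigits findInt) hall
    rw [Nat.cast_zero] at hcast
    have h2 : (!(pvDigits findInt).isEmpty) = true := by simp [h]
    simp only [h2, if_true]
    rw [hcast]
    ring
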